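-- pv_equiv track=rewrite | github.com/iron-island/adventofcode | solutions/2024/12.py | horizontal_scan
-- ===== SOURCE A (Python) =====
-- def horizontal_scan(fences_list):
--     MIN_ROW = 1000000
--     MIN_COL = 1000000
--     MAX_ROW = -100000
--     MAX_COL = -100000
--     for coords in fences_list:
--         row, col = coords
--
--         MIN_ROW = min(MIN_ROW, row)
--         MIN_COL = min(MIN_COL, col)
--         MAX_ROW = max(MAX_ROW, row)
--         MAX_COL = max(MAX_COL, col)
--
--     sides = 0
--     for row in range(MIN_ROW, MAX_ROW+1):
--         started_side = False
--         for col in range(MIN_COL, MAX_COL+1):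
--             n_tuple = (row, col)
--
--             if (started_side == False) and (n_tuple in fences_list):
--                 started_side = True
--             elif (started_side) and (n_tuple not in fences_list):
--                 # Side has ended
--                 started_side = False
--                 sides += 1
--
--         if (started_side):
--             sides += 1
--
--     return sides
-- ===== SOURCE B (Python) =====
-- def horizontal_scan(fences_list):
--     pts = set(fences_list)
--     return sum(1 for (row, col) in pts if (row, col + 1) not in pts)
-- ===== Notes on version B (the rewrite author's own statement) =====
-- stated objective: faster
-- what changed: Instead of scanning every cell of the bounding box and tracking run state per row, B puts the points in a set and counts points whose right neighbour (row, col+1) is absent, i.e. counts run ends directly.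
import Mathlib
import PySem

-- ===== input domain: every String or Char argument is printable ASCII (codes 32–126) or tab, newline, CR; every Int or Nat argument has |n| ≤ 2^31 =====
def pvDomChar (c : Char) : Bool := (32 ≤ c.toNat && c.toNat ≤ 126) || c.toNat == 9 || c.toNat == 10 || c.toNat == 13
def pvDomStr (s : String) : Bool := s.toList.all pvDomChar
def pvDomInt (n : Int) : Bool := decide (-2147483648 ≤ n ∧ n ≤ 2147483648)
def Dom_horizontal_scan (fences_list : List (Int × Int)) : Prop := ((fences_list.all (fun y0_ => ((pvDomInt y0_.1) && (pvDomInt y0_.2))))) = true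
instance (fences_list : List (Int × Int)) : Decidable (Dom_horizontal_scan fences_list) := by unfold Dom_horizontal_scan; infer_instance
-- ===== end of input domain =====

-- B replaces A's bounding-box sweep with an O(n) count over the point set of points whose
-- right neighbour is absent (one count per maximal horizontal run); objective: faster.

-- ===== PORT A =====
def horizontal_scan (fences_list : List (Int × Int)) : Int :=
  let st := fences_list.foldl (fun (st : Int × Int × Int × Int) coords =>
      (min st.1 coords.1, min st.2.1 coords.2, max st.2.2.1 coords.1, max st.2.2.2 coords.2))
    (1000000, 1000000, -100000, -100000)
  (PySem.List.pyRange st.1 (st.2.2.1 + 1) 1).foldl (fun sides row =>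
      let inner := (PySem.List.pyRange st.2.1 (st.2.2.2 + 1) 1).foldl (fun (st2 : Bool × Int) col =>
          if st2.1 == false && fences_list.contains (row, col) then (true, st2.2)
          else if st2.1 && !(fences_list.contains (row, col)) then (false, st2.2 + 1)
          else st2)
        (false, sides)
      if inner.1 then inner.2 + 1 else inner.2)
    0

-- ===== PORT B =====
def horizontal_scan_alt (fences_list : List (Int × Int)) : Int :=
  let pts : PySem.Set (Int × Int) := PySem.Set.ofList fences_list
  pts.foldl (fun acc p => if !(PySem.Set.contains pts (p.1, p.2 + 1)) then acc + 1 else acc) 0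

-- ===== PRECONDITION & SPEC =====
def Spec_horizontal_scan (fences_list : List (Int × Int)) (out : Int) : Prop := out = horizontal_scan_alt fences_list
instance (fences_list : List (Int × Int)) (out : Int) : Decidable (Spec_horizontal_scan fences_list out) := by unfold Spec_horizontal_scan; infer_instance

-- ===== CLAIM (what is proved, stated in full; the proofs are below) =====
def Claim_equal_horizontal_scan : Prop := ∀ (fences_list : List (Int × Int)), Dom_horizontal_scan fences_list → Spec_horizontal_scan fences_list (horizontal_scan fences_list)

-- ===== LEMMAS AND PROOFS =====

-- membership predicate used throughout the proof
def hsMem (L : List (Int × Int)) (r c : Int) : Bool := L.contains (r, c)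

-- A's inner-loop step function and its closed form
def hsStep (L : List (Int × Int)) (row : Int) (st2 : Bool × Int) (col : Int) : Bool × Int :=
  if st2.1 == false && L.contains (row, col) then (true, st2.2)
  else if st2.1 && !(L.contains (row, col)) then (false, st2.2 + 1)
  else st2

lemma hsStep_eq (L : List (Int × Int)) (row : Int) (b : Bool) (s col : Int) :
    hsStep L row (b, s) col = (hsMem L row col, if b && !(hsMem L row col) then s + 1 else s) := by
  unfold hsStep hsMem
  cases b <;> cases h : L.contains (row, col) <;> simp

-- the inner fold over the consecutive columns, in closed form
lemma hsInner (L : List (Int × Int)) (row : Int) :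
    ∀ (n : Nat) (a : Int) (s : Int),
      (PySem.List.pyRange a (a + n) 1).foldl (hsStep L row) (hsMem L row (a - 1), s)
        = (hsMem L row (a + n - 1),
           s + ((PySem.List.pyRange a (a + n) 1).countP
                 (fun c => hsMem L row (c - 1) && !(hsMem L row c)) : Int)) := by
  intro n
  induction n with
  | zero => intro a s; simp
  | succ m ih =>
    intro a s
    rw [PySem.List.pyRange_one_cons (by push_cast; omega : a < a + (((m + 1 : Nat)) : Int))]
    rw [List.foldl_cons, hsStep_eq]
    rw [show a + (((m + 1 : Nat)) : Int) = (a + 1) + ((m : Nat) : Int) by push_cast; ring]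
    rw [show hsMem L row a = hsMem L row ((a + 1) - 1) by norm_num]
    rw [ih (a + 1) (if hsMem L row (a - 1) && !(hsMem L row ((a + 1) - 1)) then s + 1 else s)]
    rw [List.countP_cons]
    refine Prod.ext rfl ?_
    simp only [show (a + 1) - 1 = a by ring]
    push_cast
    split_ifs with h <;> omega

lemma hsShift (L : List (Int × Int)) (row a b : Int) :
    (PySem.List.pyRange a b 1).countP (fun c => hsMem L row (c - 1) && !(hsMem L row c)) =
    (PySem.List.pyRange (a - 1) (b - 1) 1).countP (fun c => hsMem L row c && !(hsMem L row (c + 1))) := by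
  rw [PySem.List.pyRange_one, PySem.List.pyRange_one, List.countP_map, List.countP_map,
      show (b - 1) - (a - 1) = b - a by ring]
  apply List.countP_congr
  intro k _
  simp only [Function.comp_apply]
  rw [show a + (k : Int) - 1 = a - 1 + k by ring, show a - 1 + (k : Int) + 1 = a + k by ring]

-- per-row count: runs counted by A's row scan = points of the row whose right neighbour is absent
lemma hsRow (L : List (Int × Int)) (row a b : Int) (hab : a ≤ b)
    (hlo : hsMem L row (a - 1) = false) (hhi : hsMem L row (b + 1) = false) :
    ((PySem.List.pyRange a (b + 1) 1).countP (fun c => hsMem L row (c - 1) && !(hsMem L row c)) : Int)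
      + (if hsMem L row b then 1 else 0)
    = ((PySem.List.pyRange a (b + 1) 1).countP (fun c => hsMem L row c && !(hsMem L row (c + 1))) : Int) := by
  rw [hsShift, show b + 1 - 1 = b by ring]
  rw [PySem.List.pyRange_one_cons (by omega : a - 1 < b), show a - 1 + 1 = a by ring, List.countP_cons]
  rw [PySem.List.pyRange_one_succ_right (by omega : a ≤ b), List.countP_append]
  simp only [hlo, List.countP_cons, List.countP_nil, hhi, Bool.false_and,
    Bool.not_false, Bool.and_true]
  push_cast
  split_ifs <;> omega


-- bounds from A's first fold
def hsBStep (st : Int × Int × Int × Int) (coords : Int × Int) : Int × Int × Int × Int :=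
  (min st.1 coords.1, min st.2.1 coords.2, max st.2.2.1 coords.1, max st.2.2.2 coords.2)

lemma hsBounds (L : List (Int × Int)) : ∀ (st : Int × Int × Int × Int),
    ((L.foldl hsBStep st).1 ≤ st.1 ∧ (L.foldl hsBStep st).2.1 ≤ st.2.1 ∧
      st.2.2.1 ≤ (L.foldl hsBStep st).2.2.1 ∧ st.2.2.2 ≤ (L.foldl hsBStep st).2.2.2) ∧
    ∀ p ∈ L, (L.foldl hsBStep st).1 ≤ p.1 ∧ (L.foldl hsBStep st).2.1 ≤ p.2 ∧
      p.1 ≤ (L.foldl hsBStep st).2.2.1 ∧ p.2 ≤ (L.foldl hsBStep st).2.2.2 := by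
  induction L with
  | nil => intro st; simp
  | cons q L ih =>
    intro st
    obtain ⟨hmono, hbd⟩ := ih (hsBStep st q)
    simp only [List.foldl_cons]
    refine ⟨⟨le_trans hmono.1 (min_le_left _ _), le_trans hmono.2.1 (min_le_left _ _),
      le_trans (le_max_left _ _) hmono.2.2.1, le_trans (le_max_left _ _) hmono.2.2.2⟩, ?_⟩
    intro p hp
    rcases List.mem_cons.mp hp with rfl | hp'
    · exact ⟨le_trans hmono.1 (min_le_right _ _), le_trans hmono.2.1 (min_le_right _ _),
        le_trans (le_max_right _ _) hmono.2.2.1, le_trans (le_max_right _ _) hmono.2.2.2⟩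
    · exact hbd p hp'

lemma hsContains_ofList (L : List (Int × Int)) (x : Int × Int) :
    PySem.Set.contains (PySem.Set.ofList L) x = L.contains x := by
  rw [Bool.eq_iff_iff, PySem.Set.contains_iff, List.contains_iff_mem, PySem.Set.mem_ofList]

lemma hsMain (L : List (Int × Int)) (p₀ : Int × Int) (hp₀ : p₀ ∈ L)
    (mr mc Mr Mc : Int) (hbd : ∀ p ∈ L, mr ≤ p.1 ∧ mc ≤ p.2 ∧ p.1 ≤ Mr ∧ p.2 ≤ Mc) :
    (PySem.List.pyRange mr (Mr + 1) 1).foldl (fun sides row =>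
        let inner := (PySem.List.pyRange mc (Mc + 1) 1).foldl (hsStep L row) (false, sides)
        if inner.1 then inner.2 + 1 else inner.2) 0
      = ((PySem.Set.ofList L).countP (fun p => !(L.contains (p.1, p.2 + 1))) : Int) := by
  have hcLo : ∀ row c, c < mc → hsMem L row c = false := by
    intro row c hc
    rw [hsMem, Bool.eq_false_iff]
    intro h
    have := (hbd _ (List.contains_iff_mem.mp h)).2.1
    simp at this; omega
  have hcHi : ∀ row c, Mc < c → hsMem L row c = false := by
    intro row c hc
    rw [hsMem, Bool.eq_false_iff]
    intro h
    have := (hbd _ (List.contains_iff_mem.mp h)).2.2.2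
    simp at this; omega
  have hmc : mc ≤ Mc := le_trans (hbd p₀ hp₀).2.1 (hbd p₀ hp₀).2.2.2
  have hrow : ∀ (sides row : Int),
      (let inner := (PySem.List.pyRange mc (Mc + 1) 1).foldl (hsStep L row) (false, sides)
       if inner.1 then inner.2 + 1 else inner.2)
      = sides + ((PySem.List.pyRange mc (Mc + 1) 1).countP
          (fun c => hsMem L row c && !(hsMem L row (c + 1))) : Int) := by
    intro sides row
    have h0 : (false, sides) = (hsMem L row (mc - 1), sides) := by
      rw [hcLo row (mc - 1) (by omega)]
    rw [h0]
    have hi := hsInner L row (Mc + 1 - mc).toNat mc sides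
    rw [show mc + (((Mc + 1 - mc).toNat : Nat) : Int) = Mc + 1 by omega] at hi
    rw [hi]
    show (if hsMem L row (Mc + 1 - 1) then _ + 1 else _) = _
    rw [show Mc + 1 - 1 = Mc by ring]
    rw [← hsRow L row mc Mc hmc (hcLo row (mc - 1) (by omega)) (hcHi row (Mc + 1) (by omega))]
    push_cast
    split_ifs <;> ring
  rw [funext fun sides => funext fun row => hrow sides row, PySem.List.foldl_add, zero_add]
  rw [show (PySem.List.pyRange mr (Mr + 1) 1).map
        (fun row => (((PySem.List.pyRange mc (Mc + 1) 1).countP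
          (fun c => hsMem L row c && !(hsMem L row (c + 1))) : Nat) : Int))
      = (((PySem.List.pyRange mr (Mr + 1) 1).map
        (fun row => (PySem.List.pyRange mc (Mc + 1) 1).countP
          (fun c => hsMem L row c && !(hsMem L row (c + 1))))).map (fun n : Nat => (n : Int)))
      from by rw [List.map_map]; rfl]
  rw [← Nat.cast_list_sum]
  congr 1
  -- Nat-level counting: sum over the box of run-end indicators = #distinct points with no right neighbour
  have lhs : ((PySem.List.pyRange mr (Mr + 1) 1).map
        (fun row => (PySem.List.pyRange mc (Mc + 1) 1).countP
          (fun c => hsMem L row c && !(hsMem L row (c + 1))))).sum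
      = ((PySem.List.pyRange mr (Mr + 1) 1).flatMap
          (fun r => ((PySem.List.pyRange mc (Mc + 1) 1).filter
            (fun c => hsMem L r c && !(hsMem L r (c + 1)))).map (fun c => (r, c)))).length := by
    rw [List.length_flatMap]
    congr 1
    refine List.map_congr_left fun r _ => ?_
    rw [List.length_map, List.countP_eq_length_filter]
  rw [lhs, List.countP_eq_length_filter]
  apply List.Perm.length_eq
  have nd1 : ((PySem.List.pyRange mr (Mr + 1) 1).flatMap
      (fun r => ((PySem.List.pyRange mc (Mc + 1) 1).filter
        (fun c => hsMem L r c && !(hsMem L r (c + 1)))).map (fun c => (r, c)))).Nodup := by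
    rw [List.nodup_flatMap]
    constructor
    · intro r _
      exact ((PySem.List.nodup_pyRange_one mc (Mc + 1)).filter _).map
        (fun a b h => by simpa using h)
    · refine (PySem.List.pairwise_lt_pyRange_one mr (Mr + 1)).imp ?_
      intro r1 r2 h12
      rw [Function.onFun, List.disjoint_left]
      rintro ⟨x, y⟩ h1 h2
      simp only [List.mem_map, List.mem_filter] at h1 h2
      obtain ⟨c1, _, hc1⟩ := h1
      obtain ⟨c2, _, hc2⟩ := h2
      cases hc1; cases hc2; omega
  have nd2 : ((PySem.Set.ofList L).filter (fun p => !(L.contains (p.1, p.2 + 1)))).Nodup :=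
    (PySem.Set.nodup_ofList L).filter _
  rw [List.perm_ext_iff_of_nodup nd1 nd2]
  rintro ⟨x, y⟩
  simp only [List.mem_flatMap, List.mem_map, List.mem_filter, PySem.List.mem_pyRange_one,
    PySem.Set.mem_ofList, hsMem]
  constructor
  · rintro ⟨r, hr, c, ⟨hc, hset⟩, heq⟩
    rw [Prod.mk.injEq] at heq
    obtain ⟨rfl, rfl⟩ := heq
    rw [Bool.and_eq_true] at hset
    exact ⟨List.contains_iff_mem.mp hset.1, hset.2⟩
  · rintro ⟨hmem, hno⟩
    have hb := hbd _ hmem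
    exact ⟨x, ⟨hb.1, by omega⟩, y, ⟨⟨hb.2.1, by omega⟩,
      by rw [Bool.and_eq_true]; exact ⟨List.contains_iff_mem.mpr hmem, hno⟩⟩, rfl⟩

-- ===== VERDICT (by name: the statement is the Claim_ definition above) =====
theorem horizontal_scan_spec : Claim_equal_horizontal_scan := by
  intro L _
  unfold Spec_horizontal_scan
  simp only [horizontal_scan, horizontal_scan_alt]
  rw [PySem.List.foldl_if_add_one
    (fun p : Int × Int => !(PySem.Set.contains (PySem.Set.ofList L) (p.1, p.2 + 1))), zero_add]
  have hcp : ((PySem.Set.ofList L).countP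
        (fun p => !(PySem.Set.contains (PySem.Set.ofList L) (p.1, p.2 + 1))) : Nat)
      = (PySem.Set.ofList L).countP (fun p => !(L.contains (p.1, p.2 + 1))) :=
    List.countP_congr (fun p _ => by rw [hsContains_ofList])
  rw [hcp]
  cases L with
  | nil =>
    rw [PySem.List.pyRange_one_eq_nil (by norm_num)]
    simp [PySem.Set.ofList]
  | cons q L' =>
    obtain ⟨-, hbd⟩ := hsBounds (q :: L') (1000000, 1000000, -100000, -100000)
    exact hsMain (q :: L') q (List.mem_cons_self) _ _ _ _ hbd
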